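-- pv_equiv track=rewrite | github.com/InMoment/kibana-sidecar | sidecar/kibana-sidecar.py | reorderObjectsToUpload
-- ===== SOURCE A (Python) =====
-- def reorderObjectsToUpload(objectsArr):
--     indexPatterns = []
--     searches = []
--     visualizations = []
--     dashboards = []
--     other = []
--
--     for o in objectsArr:
--         type = o["type"]
--         if type == "index-pattern":
--             indexPatterns.append(o)
--         elif type == "search":
--             searches.append(o)
--         elif type == "visualization":
--             visualizations.append(o)
--         elif type == "dashboard":
--             dashboards.append(o)
--         else:
--             other.append(o)
--     all = []
--     all.extend(indexPatterns)
--     all.extend(searches)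
--     all.extend(visualizations)
--     all.extend(dashboards)
--     all.extend(other)
--
--     return all
-- ===== SOURCE B (Python) =====
-- def reorderObjectsToUpload(objectsArr):
--     rank = {"index-pattern": 0, "search": 1, "visualization": 2, "dashboard": 3}
--     return [o for r in range(5) for o in objectsArr if rank.get(o["type"], 4) == r]
-- ===== Notes on version B (the rewrite author's own statement) =====
-- stated objective: simpler
-- what changed: Replaces the five explicit accumulator buckets and final extends with a two-line comprehension that, for each rank 0..4 from a type->rank dict, filters the input once and concatenates the passes.
import Mathlib
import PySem

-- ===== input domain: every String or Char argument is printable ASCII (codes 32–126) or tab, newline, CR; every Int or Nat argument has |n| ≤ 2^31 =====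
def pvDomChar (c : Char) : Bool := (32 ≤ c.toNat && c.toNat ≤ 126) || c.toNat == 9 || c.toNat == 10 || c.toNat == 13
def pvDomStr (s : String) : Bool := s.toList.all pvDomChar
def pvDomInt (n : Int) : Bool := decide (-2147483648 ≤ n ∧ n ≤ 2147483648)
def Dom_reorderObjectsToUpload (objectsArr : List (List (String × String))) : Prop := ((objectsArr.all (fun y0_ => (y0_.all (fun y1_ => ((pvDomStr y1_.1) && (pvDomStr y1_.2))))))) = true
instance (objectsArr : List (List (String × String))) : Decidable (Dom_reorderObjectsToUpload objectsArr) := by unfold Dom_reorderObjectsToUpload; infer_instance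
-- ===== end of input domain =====

-- B replaces A's five accumulator buckets with a rank dict plus a filter pass per rank (objective: simpler).

-- ===== PORT A =====
-- o["type"] (first matching key of the association list); the `getD ""` default is
-- never reached inside Pre_ (Python raises KeyError there).
def pvTypeOf (o : List (String × String)) : String := (o.lookup "type").getD ""

-- one step of A's for-loop over the five bucket lists
def pvStepA (st : List (List (String × String)) × List (List (String × String)) × List (List (String × String)) × List (List (String × String)) × List (List (String × String)))
    (o : List (String × String)) :
    List (List (String × String)) × List (List (String × String)) × List (List (String × String)) × List (List (String × String)) × List (List (String × String)) :=
  let t := pvTypeOf o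
  if t == "index-pattern" then (st.1 ++ [o], st.2.1, st.2.2.1, st.2.2.2.1, st.2.2.2.2)
  else if t == "search" then (st.1, st.2.1 ++ [o], st.2.2.1, st.2.2.2.1, st.2.2.2.2)
  else if t == "visualization" then (st.1, st.2.1, st.2.2.1 ++ [o], st.2.2.2.1, st.2.2.2.2)
  else if t == "dashboard" then (st.1, st.2.1, st.2.2.1, st.2.2.2.1 ++ [o], st.2.2.2.2)
  else (st.1, st.2.1, st.2.2.1, st.2.2.2.1, st.2.2.2.2 ++ [o])

def reorderObjectsToUpload (objectsArr : List (List (String × String))) : List (List (String × String)) :=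
  let st := objectsArr.foldl pvStepA ([], [], [], [], [])
  st.1 ++ st.2.1 ++ st.2.2.1 ++ st.2.2.2.1 ++ st.2.2.2.2

-- ===== PORT B =====
def pvRankDict : PySem.Dict String Int :=
  PySem.Dict.ofList [("index-pattern", 0), ("search", 1), ("visualization", 2), ("dashboard", 3)]

-- rank.get(o["type"], 4)
def pvRankOf (o : List (String × String)) : Int := pvRankDict.getD (pvTypeOf o) 4

def reorderObjectsToUpload_alt (objectsArr : List (List (String × String))) : List (List (String × String)) :=
  (PySem.List.pyRange 0 5 1).flatMap (fun r => objectsArr.filter (fun o => pvRankOf o == r))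

-- ===== PRECONDITION & SPEC =====
-- Pre_ excludes objects with no "type" key: Python A (and B) raise KeyError there.
def Pre_reorderObjectsToUpload (objectsArr : List (List (String × String))) : Prop :=
  ∀ o ∈ objectsArr, (o.lookup "type").isSome = true
instance (objectsArr : List (List (String × String))) : Decidable (Pre_reorderObjectsToUpload objectsArr) := by unfold Pre_reorderObjectsToUpload; infer_instance
def pvWitness_reorderObjectsToUpload : (List (List (String × String))) :=
  [[("type", "dashboard"), ("id", "d1")], [("type", "search")], [("type", "weird")], [("type", "index-pattern")]]

def Spec_reorderObjectsToUpload (objectsArr : List (List (String × String))) (out : List (List (String × String))) : Prop := out = reorderObjectsToUpload_alt objectsArr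
instance (objectsArr : List (List (String × String))) (out : List (List (String × String))) : Decidable (Spec_reorderObjectsToUpload objectsArr out) := by unfold Spec_reorderObjectsToUpload; infer_instance

-- ===== CLAIM (what is proved, stated in full; the proofs are below) =====
def Claim_equal_reorderObjectsToUpload : Prop := ∀ (objectsArr : List (List (String × String))), Dom_reorderObjectsToUpload objectsArr → Pre_reorderObjectsToUpload objectsArr → Spec_reorderObjectsToUpload objectsArr (reorderObjectsToUpload objectsArr)

-- ===== LEMMAS AND PROOFS =====

-- rank r picked by B's filter, as a predicate
def pvHasRank (r : Int) (o : List (String × String)) : Bool := pvRankOf o == r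

lemma pvRankOf_eq (o : List (String × String)) :
    pvRankOf o = (if pvTypeOf o == "index-pattern" then 0
      else if pvTypeOf o == "search" then 1
      else if pvTypeOf o == "visualization" then 2
      else if pvTypeOf o == "dashboard" then 3 else 4) := by
  simp only [pvRankOf, pvRankDict]
  split_ifs with h1 h2 h3 h4
  · rw [eq_of_beq h1]; decide
  · rw [eq_of_beq h2]; decide
  · rw [eq_of_beq h3]; decide
  · rw [eq_of_beq h4]; decide
  · have e1 : ("index-pattern" == pvTypeOf o) = false := by
      simpa using fun h => h1 (by simp [h])
    have e2 : ("search" == pvTypeOf o) = false := by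
      simpa using fun h => h2 (by simp [h])
    have e3 : ("visualization" == pvTypeOf o) = false := by
      simpa using fun h => h3 (by simp [h])
    have e4 : ("dashboard" == pvTypeOf o) = false := by
      simpa using fun h => h4 (by simp [h])
    simp [PySem.Dict.getD, PySem.Dict.get?, PySem.Dict.ofList, PySem.Dict.update,
      PySem.Dict.empty, PySem.Dict.insert, PySem.Dict.contains, List.find?, e1, e2, e3, e4]

lemma pvLoop_out (xs : List (List (String × String)))
    (st : List (List (String × String)) × List (List (String × String)) × List (List (String × String)) × List (List (String × String)) × List (List (String × String))) :
    (let r := xs.foldl pvStepA st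
     r.1 ++ r.2.1 ++ r.2.2.1 ++ r.2.2.2.1 ++ r.2.2.2.2) =
    (st.1 ++ xs.filter (pvHasRank 0)) ++ (st.2.1 ++ xs.filter (pvHasRank 1)) ++
    (st.2.2.1 ++ xs.filter (pvHasRank 2)) ++ (st.2.2.2.1 ++ xs.filter (pvHasRank 3)) ++
    (st.2.2.2.2 ++ xs.filter (pvHasRank 4)) := by
  induction xs generalizing st with
  | nil => simp
  | cons x xs ih =>
    simp only [List.foldl_cons]
    rw [ih]
    simp only [pvStepA, pvHasRank, List.filter_cons]
    have hr := pvRankOf_eq x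
    split_ifs at hr <;> simp_all
theorem reorderObjectsToUpload_spec : Claim_equal_reorderObjectsToUpload := by
  intro objectsArr _ _
  unfold Spec_reorderObjectsToUpload reorderObjectsToUpload reorderObjectsToUpload_alt
  rw [pvLoop_out]
  have : PySem.List.pyRange 0 5 1 = [0, 1, 2, 3, 4] := by decide
  simp only [this, List.flatMap_cons, List.flatMap_nil, List.append_nil, List.append_assoc]
  rfl
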